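-- pv_equiv track=rewrite | github.com/zznidar/OP2021 | vaje/kolokvij1/naloga2-3/naloge.py | naj_padavin
-- ===== SOURCE A (Python) =====
-- def naj_padavin(data):
--     out = set()
--     M = 0
--     for datum, tip_padavin, kolicina_padavin, temperatura in data:
--         if(kolicina_padavin == 0):
--             continue
--         if(kolicina_padavin == M):
--             out.add(datum)
--         elif(kolicina_padavin > M):
--             out = {datum}
--             M = kolicina_padavin
--     return(out)
-- ===== SOURCE B (Python) =====
-- def naj_padavin(data):
--     M = max((kolicina for _, _, kolicina, _ in data if kolicina > 0), default=0)
--     return {datum for datum, _, kolicina, _ in data if kolicina > 0 and kolicina == M}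
-- ===== Notes on version B (the rewrite author's own statement) =====
-- stated objective: simpler
-- what changed: Replaced A's single interleaved running-max loop with reset-and-collect set state by two independent passes: a max reduction over positive amounts, then a set comprehension filtering dates equal to that maximum.
import Mathlib
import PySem

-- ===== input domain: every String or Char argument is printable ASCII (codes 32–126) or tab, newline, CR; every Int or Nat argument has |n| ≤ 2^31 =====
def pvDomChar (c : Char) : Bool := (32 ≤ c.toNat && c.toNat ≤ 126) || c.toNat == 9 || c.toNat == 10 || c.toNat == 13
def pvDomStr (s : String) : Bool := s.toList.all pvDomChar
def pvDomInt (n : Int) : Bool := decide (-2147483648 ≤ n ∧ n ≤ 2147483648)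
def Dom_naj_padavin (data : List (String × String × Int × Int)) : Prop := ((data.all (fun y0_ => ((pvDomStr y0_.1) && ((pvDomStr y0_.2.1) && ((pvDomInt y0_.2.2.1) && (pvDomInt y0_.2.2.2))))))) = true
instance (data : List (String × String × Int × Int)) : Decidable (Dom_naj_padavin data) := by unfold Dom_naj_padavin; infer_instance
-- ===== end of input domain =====

-- B replaces A's interleaved running-max loop (with set reset) by two independent passes:
-- a max reduction over positive amounts, then a set comprehension; same O(n), simpler.

-- ===== PORT A =====
-- A's for-loop over (out, M): structural recursion carrying the same state, branches in order.
def najPadLoop (rest : List (String × String × Int × Int)) (out : PySem.Set String) (M : Int) : PySem.Set String :=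
  match rest with
  | [] => out
  | (datum, _, kolicina, _) :: rest' =>
    if kolicina = 0 then najPadLoop rest' out M
    else if kolicina = M then najPadLoop rest' (PySem.Set.add out datum) M
    else if kolicina > M then najPadLoop rest' (PySem.Set.add PySem.Set.empty datum) kolicina
    else najPadLoop rest' out M

def naj_padavin (data : List (String × String × Int × Int)) : List String :=
  najPadLoop data PySem.Set.empty 0

-- ===== PORT B =====
def naj_padavin_alt (data : List (String × String × Int × Int)) : List String :=
  let M : Int := ((PySem.List.max? (data.filterMap (fun e => if e.2.2.1 > 0 then some e.2.2.1 else none)) (fun y => y)).getD 0)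
  PySem.Set.ofList (data.filterMap (fun e => if e.2.2.1 > 0 ∧ e.2.2.1 = M then some e.1 else none))

-- ===== PRECONDITION & SPEC =====
def Spec_naj_padavin (data : List (String × String × Int × Int)) (out : List String) : Prop := out = naj_padavin_alt data
instance (data : List (String × String × Int × Int)) (out : List String) : Decidable (Spec_naj_padavin data out) := by unfold Spec_naj_padavin; infer_instance

-- ===== CLAIM (what is proved, stated in full; the proofs are below) =====
def Claim_equal_naj_padavin : Prop := ∀ (data : List (String × String × Int × Int)), Dom_naj_padavin data → Spec_naj_padavin data (naj_padavin data)

-- ===== LEMMAS AND PROOFS =====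

-- dates of entries with positive amount equal to M, in order
def selPad (M : Int) (l : List (String × String × Int × Int)) : List String :=
  l.filterMap (fun e => if e.2.2.1 > 0 ∧ e.2.2.1 = M then some e.1 else none)

-- running max of amounts starting from M
def maxPad (M : Int) (l : List (String × String × Int × Int)) : Int :=
  l.foldl (fun m e => max m e.2.2.1) M

theorem selPad_nil (M : Int) : selPad M [] = [] := rfl

theorem ofList_append_singleton (l : List String) (d : String) :
    PySem.Set.ofList (l ++ [d]) = PySem.Set.add (PySem.Set.ofList l) d := by
  simp [PySem.Set.ofList_eq_foldl, List.foldl_append]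

theorem selPad_append (M : Int) (l l' : List (String × String × Int × Int)) :
    selPad M (l ++ l') = selPad M l ++ selPad M l' := by
  simp [selPad, List.filterMap_append]

theorem selPad_empty_of_lt (M k : Int) (l : List (String × String × Int × Int))
    (h : ∀ e ∈ l, e.2.2.1 ≤ M) (hk : M < k) : selPad k l = [] := by
  induction l with
  | nil => rfl
  | cons e t ih =>
    have h1 := h e (by simp)
    have ht : ∀ e ∈ t, e.2.2.1 ≤ M := fun x hx => h x (by simp [hx])
    simp only [selPad, List.filterMap_cons] at *
    have : ¬ (e.2.2.1 > 0 ∧ e.2.2.1 = k) := by rintro ⟨_, rfl⟩; omega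
    simp [this, ih ht]

-- the main loop invariant: starting from the selection/max of a processed prefix,
-- the loop ends at the selection of the whole list under its final max
theorem najPadLoop_eq (rest : List (String × String × Int × Int)) :
    ∀ (pref : List (String × String × Int × Int)) (M : Int),
    0 ≤ M → (∀ e ∈ pref, e.2.2.1 ≤ M) →
    najPadLoop rest (PySem.Set.ofList (selPad M pref)) M
      = PySem.Set.ofList (selPad (maxPad M rest) (pref ++ rest)) := by
  induction rest with
  | nil => intro pref M _ _; simp [najPadLoop, maxPad]
  | cons e t ih =>
    rintro pref M hM hle
    obtain ⟨d, tp, k, tm⟩ := e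
    by_cases h0 : k = 0
    · subst h0
      simp only [najPadLoop, if_true]
      have := ih (pref ++ [(d, tp, (0:Int), tm)]) M hM (by
        intro e he
        rcases List.mem_append.mp he with h | h
        · exact hle e h
        · simp at h; subst h; simpa using hM)
      rw [show selPad M (pref ++ [(d, tp, (0:Int), tm)]) = selPad M pref by
            simp [selPad]] at this
      rw [this]
      simp [maxPad, max_eq_left hM, List.append_assoc]
    · by_cases hM' : k = M
      · subst hM'
        have hkpos : k > 0 := by omega
        simp only [najPadLoop, if_true]
        have := ih (pref ++ [(d, tp, k, tm)]) k hM (by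
          intro e he
          rcases List.mem_append.mp he with h | h
          · exact hle e h
          · simp at h; subst h; simp)
        rw [selPad_append,
            show selPad k [(d, tp, k, tm)] = [d] by simp [selPad, hkpos],
            ofList_append_singleton] at this
        rw [show pref ++ (d, tp, k, tm) :: t = pref ++ [(d, tp, k, tm)] ++ t by simp,
            show maxPad k ((d, tp, k, tm) :: t) = maxPad k t by simp [maxPad]]
        rw [if_neg h0]; exact this
      · by_cases hgt : k > M
        · have hkpos : k > 0 := by omega
          simp only [najPadLoop]
          rw [if_neg h0, if_neg hM', if_pos hgt]
          have hsel : selPad k pref = [] := selPad_empty_of_lt M k pref hle hgt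
          have := ih (pref ++ [(d, tp, k, tm)]) k (by omega) (by
            intro e he
            rcases List.mem_append.mp he with h | h
            · have := hle e h; omega
            · simp at h; subst h; simp)
          rw [selPad_append, hsel, List.nil_append,
              show selPad k [(d, tp, k, tm)] = [d] by simp [selPad, hkpos]] at this
          rw [show (PySem.Set.add PySem.Set.empty d : List String) = PySem.Set.ofList [d] from rfl]
          rw [this]
          simp [maxPad, max_eq_right hgt.le, List.append_assoc]
        · -- k < M, k ≠ 0 (possibly negative)
          simp only [najPadLoop, if_neg h0, if_neg hM', if_neg hgt]
          have := ih (pref ++ [(d, tp, k, tm)]) M hM (by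
            intro e he
            rcases List.mem_append.mp he with h | h
            · exact hle e h
            · simp at h; subst h; simp; omega)
          rw [show selPad M (pref ++ [(d, tp, k, tm)]) = selPad M pref by
                simp [selPad]; intro _ h; exact absurd h hM'] at this
          rw [this]
          simp [maxPad, max_eq_left (by omega : k ≤ M), List.append_assoc]

-- B's max over positives equals A's running max from 0
theorem maxPad_eq_pos (data : List (String × String × Int × Int)) :
    ∀ M : Int, 0 ≤ M →
    maxPad M data = (data.filterMap (fun e => if e.2.2.1 > 0 then some e.2.2.1 else none)).foldl max M := by
  induction data with
  | nil => intro M _; simp [maxPad]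
  | cons e t ih =>
    intro M hM
    by_cases h : e.2.2.1 > 0
    · simp only [maxPad, List.foldl_cons, List.filterMap_cons, if_pos h]
      exact ih (max M e.2.2.1) (le_trans hM (le_max_left _ _))
    · simp only [maxPad, List.foldl_cons, List.filterMap_cons, if_neg h]
      rw [max_eq_left (by omega : e.2.2.1 ≤ M)]
      exact ih M hM

theorem maxB_eq (data : List (String × String × Int × Int)) :
    ((PySem.List.max? (data.filterMap (fun e => if e.2.2.1 > 0 then some e.2.2.1 else none)) (fun y => y)).getD 0) = maxPad 0 data := by
  rw [maxPad_eq_pos data 0 le_rfl]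
  cases hl : data.filterMap (fun e => if e.2.2.1 > 0 then some e.2.2.1 else none) with
  | nil => simp [PySem.List.max?]
  | cons x t =>
    have hx : (0:Int) < x := by
      have hm : x ∈ data.filterMap (fun e => if e.2.2.1 > 0 then some e.2.2.1 else none) := by
        rw [hl]; simp
      obtain ⟨e, _, he⟩ := List.mem_filterMap.mp hm
      by_cases h : e.2.2.1 > 0 <;> simp [h] at he
      omega
    rw [PySem.List.max?_id_cons]
    simp [max_eq_right hx.le]

-- ===== VERDICT (by name: the statement is the Claim_ definition above) =====
theorem naj_padavin_spec : Claim_equal_naj_padavin := by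
  intro data _
  unfold Spec_naj_padavin naj_padavin naj_padavin_alt
  have h := najPadLoop_eq data [] 0 le_rfl (by simp)
  simp only [selPad_nil, List.nil_append] at h
  rw [show (PySem.Set.empty : List String) = PySem.Set.ofList ([] : List String) from rfl, h,
      maxB_eq]
  rfl
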